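-- pv_equiv track=rewrite | github.com/TonyXieXie/AgentPractice | tauri-agent-demo/python-backend/team_coordinator.py | _extract_changed_files_from_patch_text
-- ===== SOURCE A (Python) =====
-- from typing import Any, Awaitable, Callable, Dict, List, Optional, Set, Tuple
--
-- def _normalize_text(value: Any) -> str:
--     if value is None:
--         return ""
--     return str(value).strip()
--
-- def _extract_changed_files_from_patch_text(patch_text: Any) -> List[Dict[str, str]]:
--     results: List[Dict[str, str]] = []
--     header_prefixes = {
--         "*** Add File: ": "added",
--         "*** Update File: ": "modified",
--         "*** Delete File: ": "deleted",
--     }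
--     for raw_line in str(patch_text or "").splitlines():
--         line = str(raw_line or "").strip()
--         for prefix, status in header_prefixes.items():
--             if not line.startswith(prefix):
--                 continue
--             path = _normalize_text(line[len(prefix):])
--             if path:
--                 results.append({"path": path, "status": status})
--             break
--     return results
-- ===== SOURCE B (Python) =====
-- def _extract_changed_files_from_patch_text(patch_text):
--     lines = [raw.strip() for raw in str(patch_text or "").splitlines()]
--     indexed = []
--     for prefix, status in (("*** Add File: ", "added"),
--                            ("*** Update File: ", "modified"),
--                            ("*** Delete File: ", "deleted")):
--         for i, line in enumerate(lines):
--             if line.startswith(prefix):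
--                 path = line[len(prefix):].strip()
--                 if path:
--                     indexed.append((i, {"path": path, "status": status}))
--     indexed.sort(key=lambda t: t[0])
--     return [rec for _, rec in indexed]
-- ===== Notes on version B (the rewrite author's own statement) =====
-- stated objective: alternative
-- what changed: A makes one pass over the lines trying the three prefixes inside each line; B makes three staged passes, one per header kind over the pre-stripped lines, collecting (line_index, record) matches, then restores the original order by a stable sort on the index and projects the records (correct because the three prefixes are mutually exclusive).
import Mathlib
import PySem

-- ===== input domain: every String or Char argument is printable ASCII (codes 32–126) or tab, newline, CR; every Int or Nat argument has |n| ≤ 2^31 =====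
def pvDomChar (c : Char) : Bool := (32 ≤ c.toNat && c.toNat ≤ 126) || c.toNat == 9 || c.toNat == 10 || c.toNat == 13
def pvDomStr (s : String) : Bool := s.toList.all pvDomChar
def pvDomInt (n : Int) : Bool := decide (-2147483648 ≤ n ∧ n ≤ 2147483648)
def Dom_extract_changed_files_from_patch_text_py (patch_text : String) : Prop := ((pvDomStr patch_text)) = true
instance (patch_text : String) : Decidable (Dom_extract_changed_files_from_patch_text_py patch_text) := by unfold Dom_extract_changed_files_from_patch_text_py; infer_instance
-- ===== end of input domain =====

-- B replaces A's single pass (three-prefix startswith loop inside each line) by three staged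
-- passes, one per header kind, collecting (line_index, record) pairs, then a stable sort on the
-- index restoring the original line order before projecting the records (objective: alternative).


-- the three header prefixes (shared literals)
def pvPfxA : List Char := ['*','*','*',' ','A','d','d',' ','F','i','l','e',':',' ']
def pvPfxU : List Char := ['*','*','*',' ','U','p','d','a','t','e',' ','F','i','l','e',':',' ']
def pvPfxD : List Char := ['*','*','*',' ','D','e','l','e','t','e',' ','F','i','l','e',':',' ']

-- ===== PORT A =====
-- header_prefixes dict, iterated in insertion order (keys are distinct, so a pair list is exact)
def pvHeaderPrefixes : List (List Char × String) :=
  [(pvPfxA, "added"), (pvPfxU, "modified"), (pvPfxD, "deleted")]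

-- the inner `for prefix, status in header_prefixes.items(): ... break` loop of A
def pvTryPrefixes : List (List Char × String) → List Char → List (List (String × String))
  | [], _ => []
  | (pfx, st) :: rest, line =>
    if PySem.Chars.startswith line pfx = false then pvTryPrefixes rest line
    else
      -- line[len(prefix):].strip(); the slice start is ≤ len(line) when the branch is taken, so List.drop is exact
      let path := PySem.Chars.strip (line.drop pfx.length)
      if path ≠ [] then [[("path", String.ofList path), ("status", st)]] else []

def extract_changed_files_from_patch_text_py (patch_text : String) : List (List (String × String)) :=
  -- str(patch_text or "") is patch_text itself for a str argument ("" stays "")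
  (PySem.Str.splitlines patch_text).foldl
    (fun acc raw => acc ++ pvTryPrefixes pvHeaderPrefixes (PySem.Chars.strip raw.toList)) []

-- ===== PORT B =====
-- one inner pass of B: scan all (index, line) pairs for ONE prefix, appending (i, record) matches
def pvScan (lines : List (List Char)) (pfx : List Char) (st : String) :
    List (Int × List (String × String)) :=
  (PySem.List.enumerate lines).foldl
    (fun acc p =>
      if PySem.Chars.startswith p.2 pfx then
        let path := PySem.Chars.strip (p.2.drop pfx.length)
        if path ≠ [] then acc ++ [(p.1, [("path", String.ofList path), ("status", st)])] else acc
      else acc) []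

def extract_changed_files_from_patch_text_py_alt (patch_text : String) : List (List (String × String)) :=
  let lines := (PySem.Str.splitlines patch_text).map (fun raw => PySem.Chars.strip raw.toList)
  -- the outer loop over the three (prefix, status) pairs, unrolled
  let indexed := pvScan lines pvPfxA "added" ++ pvScan lines pvPfxU "modified"
                   ++ pvScan lines pvPfxD "deleted"
  -- indexed.sort(key=lambda t: t[0]) then [rec for _, rec in indexed]
  (PySem.List.sorted indexed (fun t => t.1) false).map (fun t => t.2)

-- ===== PRECONDITION & SPEC =====
def Spec_extract_changed_files_from_patch_text_py (patch_text : String) (out : List (List (String × String))) : Prop := out = extract_changed_files_from_patch_text_py_alt patch_text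
instance (patch_text : String) (out : List (List (String × String))) : Decidable (Spec_extract_changed_files_from_patch_text_py patch_text out) := by unfold Spec_extract_changed_files_from_patch_text_py; infer_instance

-- ===== CLAIM (what is proved, stated in full; the proofs are below) =====
def Claim_equal_extract_changed_files_from_patch_text_py : Prop := ∀ (patch_text : String), Dom_extract_changed_files_from_patch_text_py patch_text → Spec_extract_changed_files_from_patch_text_py patch_text (extract_changed_files_from_patch_text_py patch_text)

-- ===== LEMMAS AND PROOFS =====

-- the match function of one pass of B, as an Option
def pvG (pfx : List Char) (st : String) (p : Int × List Char) :
    Option (Int × List (String × String)) :=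
  if PySem.Chars.startswith p.2 pfx then
    let path := PySem.Chars.strip (p.2.drop pfx.length)
    if path ≠ [] then some (p.1, [("path", String.ofList path), ("status", st)]) else none
  else none

-- the three passes tried in order (= A's inner loop, per enumerated line)
def pvGAll (p : Int × List Char) : Option (Int × List (String × String)) :=
  (pvG pvPfxA "added" p).or ((pvG pvPfxU "modified" p).or (pvG pvPfxD "deleted" p))

lemma pv_foldl_toList {α β : Type} (g : α → Option β) (l : List α) (a : List β) :
    l.foldl (fun acc x => acc ++ (g x).toList) a = a ++ l.filterMap g := by
  induction l generalizing a with
  | nil => simp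
  | cons x l ih =>
    simp only [List.foldl_cons, List.filterMap_cons, ih]
    cases g x <;> simp

lemma pvScan_eq (lines : List (List Char)) (pfx : List Char) (st : String) :
    pvScan lines pfx st = (PySem.List.enumerate lines).filterMap (pvG pfx st) := by
  unfold pvScan
  have hb : (fun (acc : List (Int × List (String × String))) (p : Int × List Char) =>
      if PySem.Chars.startswith p.2 pfx then
        let path := PySem.Chars.strip (p.2.drop pfx.length)
        if path ≠ [] then acc ++ [(p.1, [("path", String.ofList path), ("status", st)])] else acc
      else acc)
      = fun acc p => acc ++ ((pvG pfx st p).toList) := by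
    funext acc p
    unfold pvG
    by_cases h1 : PySem.Chars.startswith p.2 pfx
    · by_cases h2 : PySem.Chars.strip (p.2.drop pfx.length) = [] <;> simp [h1, h2]
    · simp [h1]
  rw [hb, pv_foldl_toList]
  simp

-- two distinct header prefixes never head the same line
lemma pv_excl {line p q : List Char} (hpq : ¬ p <+: q) (hqp : ¬ q <+: p)
    (h : PySem.Chars.startswith line p = true) : PySem.Chars.startswith line q = false := by
  rw [Bool.eq_false_iff]
  intro hq
  rcases List.prefix_or_prefix_of_prefix ((PySem.Chars.startswith_iff _ _).mp h)
      ((PySem.Chars.startswith_iff _ _).mp hq) with h' | h'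
  · exact hpq h'
  · exact hqp h'

lemma pvG_none_of_sw_false {pfx : List Char} {st : String} {p : Int × List Char}
    (h : PySem.Chars.startswith p.2 pfx = false) : pvG pfx st p = none := by
  unfold pvG
  simp [h]

lemma pvG_sw_of_isSome {pfx : List Char} {st : String} {p : Int × List Char}
    (h : (pvG pfx st p).isSome) : PySem.Chars.startswith p.2 pfx = true := by
  unfold pvG at h
  by_contra hc
  rw [Bool.eq_false_iff.mpr hc] at h
  simp at h

-- disjointness of the three passes, pointwise
lemma pv_disj_AU {p : Int × List Char} (h : (pvG pvPfxA "added" p).isSome) :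
    pvG pvPfxU "modified" p = none :=
  pvG_none_of_sw_false (pv_excl (by decide) (by decide) (pvG_sw_of_isSome h))
lemma pv_disj_AD {p : Int × List Char} (h : (pvG pvPfxA "added" p).isSome) :
    pvG pvPfxD "deleted" p = none :=
  pvG_none_of_sw_false (pv_excl (by decide) (by decide) (pvG_sw_of_isSome h))
lemma pv_disj_UD {p : Int × List Char} (h : (pvG pvPfxU "modified" p).isSome) :
    pvG pvPfxD "deleted" p = none :=
  pvG_none_of_sw_false (pv_excl (by decide) (by decide) (pvG_sw_of_isSome h))

-- the combined filterMap is a permutation of the three staged filterMaps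
lemma pv_split (l : List (Int × List Char)) :
    (l.filterMap pvGAll).Perm
      (l.filterMap (pvG pvPfxA "added") ++ l.filterMap (pvG pvPfxU "modified")
        ++ l.filterMap (pvG pvPfxD "deleted")) := by
  induction l with
  | nil => simp
  | cons p l ih =>
    rcases hA : pvG pvPfxA "added" p with _ | a
    · rcases hU : pvG pvPfxU "modified" p with _ | b
      · rcases hD : pvG pvPfxD "deleted" p with _ | c
        · simpa [List.filterMap_cons, pvGAll, hA, hU, hD] using ih
        · simp only [List.filterMap_cons, pvGAll, hA, hU, hD, Option.none_or]
          refine (ih.cons c).trans ?_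
          simpa [List.append_assoc] using
            (List.perm_middle (a := c)
              (l₁ := l.filterMap (pvG pvPfxA "added") ++ l.filterMap (pvG pvPfxU "modified"))
              (l₂ := l.filterMap (pvG pvPfxD "deleted"))).symm
      · have hD : pvG pvPfxD "deleted" p = none := pv_disj_UD (by simp [hU])
        simp only [List.filterMap_cons, pvGAll, hA, hU, hD, Option.none_or,
          Option.some_or]
        refine (ih.cons b).trans ?_
        simpa [List.append_assoc] using
          (List.perm_middle (a := b) (l₁ := l.filterMap (pvG pvPfxA "added"))
            (l₂ := l.filterMap (pvG pvPfxU "modified") ++ l.filterMap (pvG pvPfxD "deleted"))).symm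
    · have hU : pvG pvPfxU "modified" p = none := pv_disj_AU (by simp [hA])
      have hD : pvG pvPfxD "deleted" p = none := pv_disj_AD (by simp [hA])
      simpa [List.filterMap_cons, pvGAll, hA, hU, hD] using ih.cons a

lemma pvG_fst {pfx : List Char} {st : String} {p : Int × List Char}
    {b : Int × List (String × String)} (h : pvG pfx st p = some b) : b.1 = p.1 := by
  unfold pvG at h
  split_ifs at h; simp_all
  rw [← h.2]

lemma pvGAll_fst {p : Int × List Char} {b : Int × List (String × String)}
    (h : pvGAll p = some b) : b.1 = p.1 := by
  unfold pvGAll at h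
  rcases hA : pvG pvPfxA "added" p with _ | a
  · rcases hU : pvG pvPfxU "modified" p with _ | u
    · rw [hA, hU] at h
      simp only [Option.none_or] at h
      exact pvG_fst h
    · rw [hA, hU] at h
      simp only [Option.none_or, Option.some_or] at h
      exact pvG_fst (hU.trans h)
  · rw [hA] at h
    simp only [Option.some_or] at h
    exact pvG_fst (hA.trans h)

-- the keys of the combined matches strictly increase (line order)
lemma pv_pairwise (lines : List (List Char)) :
    (((PySem.List.enumerate lines).filterMap pvGAll).Pairwise (fun a b => a.1 < b.1)) := by
  refine List.Pairwise.filterMap pvGAll ?_ (PySem.List.pairwise_lt_enumerate lines 0)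
  intro a a' hlt b hb b' hb'
  rw [pvGAll_fst hb, pvGAll_fst hb']
  exact hlt

-- per line, the combined match projected to its record is exactly A's inner loop
lemma pv_line (i : Int) (line : List Char) :
    ((pvGAll (i, line)).map (fun q => q.2)).toList = pvTryPrefixes pvHeaderPrefixes line := by
  by_cases hA : PySem.Chars.startswith line pvPfxA
  · have hU : PySem.Chars.startswith line pvPfxU = false := pv_excl (by decide) (by decide) hA
    have hD : PySem.Chars.startswith line pvPfxD = false := pv_excl (by decide) (by decide) hA
    by_cases hp : PySem.Chars.strip (line.drop pvPfxA.length) = [] <;>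
      simp [pvGAll, pvG, pvTryPrefixes, pvHeaderPrefixes, hA, hU, hD, hp]
  · rw [Bool.not_eq_true] at hA
    by_cases hU : PySem.Chars.startswith line pvPfxU
    · have hD : PySem.Chars.startswith line pvPfxD = false := pv_excl (by decide) (by decide) hU
      by_cases hp : PySem.Chars.strip (line.drop pvPfxU.length) = [] <;>
        simp [pvGAll, pvG, pvTryPrefixes, pvHeaderPrefixes, hA, hU, hD, hp]
    · rw [Bool.not_eq_true] at hU
      by_cases hD : PySem.Chars.startswith line pvPfxD
      · by_cases hp : PySem.Chars.strip (line.drop pvPfxD.length) = [] <;>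
          simp [pvGAll, pvG, pvTryPrefixes, pvHeaderPrefixes, hA, hU, hD, hp]
      · rw [Bool.not_eq_true] at hD
        simp [pvGAll, pvG, pvTryPrefixes, pvHeaderPrefixes, hA, hU, hD]

-- projecting the records of the combined matches, in line order, is A's flatMap
lemma pv_map_snd (lines : List (List Char)) (s : Int) :
    (((PySem.List.enumerate lines s).filterMap pvGAll).map (fun t => t.2))
      = lines.flatMap (pvTryPrefixes pvHeaderPrefixes) := by
  induction lines generalizing s with
  | nil => simp [PySem.List.enumerate_nil]
  | cons line rest ih =>
    rw [PySem.List.enumerate_cons, List.filterMap_cons, List.flatMap_cons, ← ih (s + 1)]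
    rcases h : pvGAll (s, line) with _ | q
    · have := pv_line s line
      rw [h] at this
      simp only [Option.map_none, Option.toList_none] at this
      rw [← this]
      simp
    · have := pv_line s line
      rw [h] at this
      simp only [Option.map_some, Option.toList_some] at this
      rw [← this]
      simp

-- ===== VERDICT (by name: the statement is the Claim_ definition above) =====
theorem extract_changed_files_from_patch_text_py_spec : Claim_equal_extract_changed_files_from_patch_text_py := by
  intro patch_text _
  unfold Spec_extract_changed_files_from_patch_text_py
  unfold extract_changed_files_from_patch_text_py extract_changed_files_from_patch_text_py_alt
  set lines := (PySem.Str.splitlines patch_text).map (fun raw => PySem.Chars.strip raw.toList) with hlines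
  have hsorted :
      PySem.List.sorted
        (pvScan lines pvPfxA "added" ++ pvScan lines pvPfxU "modified"
          ++ pvScan lines pvPfxD "deleted") (fun t => t.1) false
        = (PySem.List.enumerate lines).filterMap pvGAll := by
    refine PySem.List.sorted_eq_of_perm_of_pairwise_lt _ _ _ ?_ (pv_pairwise lines)
    rw [pvScan_eq, pvScan_eq, pvScan_eq]
    exact pv_split (PySem.List.enumerate lines)
  simp only [hsorted, pv_map_snd lines 0]
  rw [← List.flatMap_eq_foldl, hlines, List.flatMap_map]
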